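-- pv_equiv track=rewrite | github.com/s-umanap/ProblemaP1-Dalgo | ProblemaP1.py | all_positions
-- ===== SOURCE A (Python) =====
-- def identify_letters(Chain,Subchain):
--
--     different = []
--     for compare in range(0,len(Chain)):
--         if compare+1 < len(Chain):
--             if Chain[compare]+Chain[compare+1] != Subchain:
--                 tupla = compare, compare+1
--                 different.append(tupla)
--
--     return different
--
-- def all_positions(Chain,Subchain):
--     pos = identify_letters(Chain,Subchain)
--     lista = []
--     for i in pos:
--         for j in i:
--             lista.append(j)
--     result = []
--     for item in lista:
--         if item not in result:
--             result.append(item)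
--
--     return result
-- ===== SOURCE B (Python) =====
-- def all_positions(Chain, Subchain):
--     # Single membership pass: j is in the result iff it belongs to at least one
--     # qualifying adjacent pair (to its right or to its left).
--     n = len(Chain)
--     result = []
--     for j in range(n):
--         if (j + 1 < n and Chain[j] + Chain[j + 1] != Subchain) or \
--            (j >= 1 and Chain[j - 1] + Chain[j] != Subchain):
--             result.append(j)
--     return result
-- ===== Notes on version B (the rewrite author's own statement) =====
-- stated objective: simpler
-- what changed: Replaces A's build-pairs / flatten / quadratic membership-dedup pipeline by one pass over positions that appends j exactly when j belongs to a qualifying adjacent pair on its left or right.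
import Mathlib
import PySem

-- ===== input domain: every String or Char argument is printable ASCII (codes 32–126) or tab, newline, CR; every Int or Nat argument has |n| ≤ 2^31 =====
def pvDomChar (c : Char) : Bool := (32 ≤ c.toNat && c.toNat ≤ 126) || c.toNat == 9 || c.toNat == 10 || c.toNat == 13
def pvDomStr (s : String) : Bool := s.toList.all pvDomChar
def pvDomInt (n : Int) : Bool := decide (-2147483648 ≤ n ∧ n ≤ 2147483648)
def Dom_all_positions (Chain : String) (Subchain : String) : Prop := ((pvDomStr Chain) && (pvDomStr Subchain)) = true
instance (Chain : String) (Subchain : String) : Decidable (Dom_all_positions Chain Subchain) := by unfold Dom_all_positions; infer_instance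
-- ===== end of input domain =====

-- B replaces A's build-pairs / flatten / membership-dedup pipeline by a single pass that
-- appends j exactly when j belongs to a qualifying adjacent pair (objective: simpler).

-- ===== PORT A =====
-- Chain[i] + Chain[i+1] != Subchain  (two 1-char strings concatenated, compared with Subchain);
-- both ports contain this expression, so it is one shared helper. none-cases are unreachable
-- under the callers' bound guards.
def pvPairNe (cs sub : List Char) (i : Int) : Bool :=
  match PySem.List.pyGet? cs i, PySem.List.pyGet? cs (i + 1) with
  | some a, some b => [a, b] != sub
  | _, _ => false

def identify_letters (Chain : String) (Subchain : String) : List (Int × Int) :=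
  (PySem.List.pyRange 0 (PySem.Str.len Chain) 1).foldl
    (fun different compare =>
      if compare + 1 < PySem.Str.len Chain then
        if pvPairNe Chain.toList Subchain.toList compare then
          different ++ [(compare, compare + 1)]
        else different
      else different) []

def all_positions (Chain : String) (Subchain : String) : List Int :=
  let pos := identify_letters Chain Subchain
  let lista := pos.foldl (fun lista i => [i.1, i.2].foldl (fun l j => l ++ [j]) lista) []
  lista.foldl (fun result item => if item ∈ result then result else result ++ [item]) []

-- ===== PORT B =====
def all_positions_alt (Chain : String) (Subchain : String) : List Int :=
  (PySem.List.pyRange 0 (PySem.Str.len Chain) 1).foldl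
    (fun result j =>
      if (decide (j + 1 < PySem.Str.len Chain) && pvPairNe Chain.toList Subchain.toList j)
         || (decide (1 ≤ j) && pvPairNe Chain.toList Subchain.toList (j - 1)) then
        result ++ [j]
      else result) []

-- ===== PRECONDITION & SPEC =====
def Spec_all_positions (Chain : String) (Subchain : String) (out : List Int) : Prop := out = all_positions_alt Chain Subchain
instance (Chain : String) (Subchain : String) (out : List Int) : Decidable (Spec_all_positions Chain Subchain out) := by unfold Spec_all_positions; infer_instance

-- ===== CLAIM (what is proved, stated in full; the proofs are below) =====
def Claim_equal_all_positions : Prop := ∀ (Chain : String) (Subchain : String), Dom_all_positions Chain Subchain → Spec_all_positions Chain Subchain (all_positions Chain Subchain)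

-- ===== LEMMAS AND PROOFS =====

-- ofList keeps a subsequence (first occurrences) of its input.
theorem pvOfList_sublist {α : Type} [BEq α] [LawfulBEq α] (l : List α) :
    (PySem.Set.ofList l).Sublist l := by
  induction l with
  | nil => simp [PySem.Set.ofList_nil]
  | cons x xs ih =>
    rw [PySem.Set.ofList_cons]
    exact List.Sublist.cons₂ x ((List.filter_sublist).trans ih)

-- A's pair list, in closed form.
theorem pvPairs_eq (Chain Subchain : String) :
    identify_letters Chain Subchain =
      ((PySem.List.pyRange 0 (PySem.Str.len Chain) 1).filter
        (fun c => decide (c + 1 < PySem.Str.len Chain) && pvPairNe Chain.toList Subchain.toList c)).map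
        (fun c => (c, c + 1)) := by
  unfold identify_letters
  rw [PySem.List.foldl_congr_mem _ _
      (fun acc c => if (decide (c + 1 < PySem.Str.len Chain) && pvPairNe Chain.toList Subchain.toList c) then acc ++ [(c, c + 1)] else acc)
      _ ?_]
  · exact PySem.List.foldl_append_if _ _ _ _
  · intro acc c _
    by_cases h : c + 1 < PySem.Str.len Chain <;>
      by_cases hb : pvPairNe Chain.toList Subchain.toList c = true <;>
      simp [hb]

-- A's flattening loop, in closed form.
theorem pvLista_eq (pos : List (Int × Int)) :
    pos.foldl (fun lista i => [i.1, i.2].foldl (fun l j => l ++ [j]) lista) [] =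
      pos.flatMap (fun i => [i.1, i.2]) := by
  rw [PySem.List.foldl_congr_mem _ _ (fun acc i => acc ++ [i.1, i.2]) _ ?_]
  · exact PySem.List.foldl_append_eq_flatMap _ _ _
  · intro acc i _
    simp [List.foldl]

-- A's dedup loop is first-occurrence dedup, i.e. PySem.Set.ofList.
theorem pvDedup_eq (l : List Int) :
    l.foldl (fun result item => if item ∈ result then result else result ++ [item]) [] =
      PySem.Set.ofList l := by
  rw [PySem.Set.ofList_eq_foldl]
  exact PySem.List.foldl_congr_mem _ _ _ _
    (fun acc x _ => (PySem.Set.add_eq_ite acc x).symm)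

theorem all_positions_eq_ofList (Chain Subchain : String) :
    all_positions Chain Subchain =
      PySem.Set.ofList
        ((((PySem.List.pyRange 0 (PySem.Str.len Chain) 1).filter
            (fun c => decide (c + 1 < PySem.Str.len Chain) && pvPairNe Chain.toList Subchain.toList c)).map
            (fun c => (c, c + 1))).flatMap (fun i => [i.1, i.2])) := by
  simp only [all_positions, pvPairs_eq, pvLista_eq, pvDedup_eq]

theorem alt_eq_filter (Chain Subchain : String) :
    all_positions_alt Chain Subchain =
      (PySem.List.pyRange 0 (PySem.Str.len Chain) 1).filter
        (fun j => (decide (j + 1 < PySem.Str.len Chain) && pvPairNe Chain.toList Subchain.toList j)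
          || (decide (1 ≤ j) && pvPairNe Chain.toList Subchain.toList (j - 1))) := by
  unfold all_positions_alt
  exact PySem.List.foldl_append_if_eq_filter _ _ _

theorem all_positions_spec_aux (Chain Subchain : String) :
    all_positions Chain Subchain = all_positions_alt Chain Subchain := by
  rw [all_positions_eq_ofList, alt_eq_filter]
  set n := PySem.Str.len Chain with hn
  set bad := pvPairNe Chain.toList Subchain.toList with hbad
  set L := PySem.Set.ofList
        ((((PySem.List.pyRange 0 n 1).filter
            (fun c => decide (c + 1 < n) && bad c)).map
            (fun c => (c, c + 1))).flatMap (fun i => [i.1, i.2])) with hL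
  set R := (PySem.List.pyRange 0 n 1).filter
        (fun j => (decide (j + 1 < n) && bad j) || (decide (1 ≤ j) && bad (j - 1))) with hR
  -- membership is the same on both sides
  have hmem : ∀ x, x ∈ L ↔ x ∈ R := by
    intro x
    rw [hL, hR, PySem.Set.mem_ofList]
    simp only [List.mem_flatMap, List.mem_map, List.mem_filter, PySem.List.mem_pyRange_one,
      Bool.and_eq_true, Bool.or_eq_true, decide_eq_true_eq]
    constructor
    · rintro ⟨i, ⟨c, ⟨⟨hc0, hcn⟩, hc1, hb⟩, rfl⟩, hx⟩
      simp only [List.mem_cons, List.not_mem_nil, or_false] at hx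
      rcases hx with rfl | rfl
      · exact ⟨⟨hc0, by omega⟩, Or.inl ⟨hc1, hb⟩⟩
      · refine ⟨⟨by omega, hc1⟩, Or.inr ⟨by omega, ?_⟩⟩
        simpa using hb
    · rintro ⟨⟨hx0, hxn⟩, h | h⟩
      · refine ⟨(x, x + 1), ⟨x, ⟨⟨hx0, by omega⟩, h.1, h.2⟩, rfl⟩, by simp⟩
      · refine ⟨(x - 1, x), ⟨x - 1, ⟨⟨by omega, by omega⟩, by omega, h.2⟩, ?_⟩, by simp⟩
        simp only [Prod.mk.injEq]
        exact ⟨trivial, by omega⟩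
  -- both sides are strictly increasing
  have hsortR : R.Pairwise (· < ·) :=
    List.Pairwise.filter _ (PySem.List.pairwise_lt_pyRange_one 0 n)
  have hsortL : L.Pairwise (· < ·) := by
    have hpairs : ((((PySem.List.pyRange 0 n 1).filter
        (fun c => decide (c + 1 < n) && bad c)).map
        (fun c => (c, c + 1))).flatMap (fun i => [i.1, i.2])).Pairwise (· ≤ ·) := by
      rw [List.pairwise_flatMap]
      constructor
      · rintro ⟨a, b⟩ hab
        simp only [List.mem_map] at hab
        obtain ⟨c, _, hc⟩ := hab
        cases hc
        simp
      · rw [List.pairwise_map]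
        have hflt : ((PySem.List.pyRange 0 n 1).filter
            (fun c => decide (c + 1 < n) && bad c)).Pairwise (· < ·) :=
          List.Pairwise.filter _ (PySem.List.pairwise_lt_pyRange_one 0 n)
        refine hflt.imp_of_mem ?_
        intro a b _ _ hab x hx y hy
        simp only [List.mem_cons, List.not_mem_nil, or_false] at hx hy
        rcases hx with rfl | rfl <;> rcases hy with rfl | rfl <;> omega
    have hle : L.Pairwise (· ≤ ·) := List.Pairwise.sublist (pvOfList_sublist _) hpairs
    have hnd : L.Nodup := PySem.Set.nodup_ofList _
    exact (hle.and hnd).imp (fun h => lt_of_le_of_ne h.1 h.2)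
  -- equal: same members, both nodup and strictly sorted
  have hndL : L.Nodup := hsortL.imp ne_of_lt
  have hndR : R.Nodup := hsortR.imp ne_of_lt
  have hperm : L.Perm R := (List.perm_ext_iff_of_nodup hndL hndR).mpr hmem
  calc L = PySem.List.sorted R (fun x => x) :=
        (PySem.List.sorted_eq_of_perm_of_pairwise_lt R L (fun x => x) hperm hsortL).symm
    _ = R := PySem.List.sorted_eq_of_perm_of_pairwise_lt R R (fun x => x) (List.Perm.refl R) hsortR

-- ===== VERDICT (by name: the statement is the Claim_ definition above) =====
theorem all_positions_spec : Claim_equal_all_positions := by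
  intro Chain Subchain _
  exact all_positions_spec_aux Chain Subchain
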